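-- pv_equiv track=rewrite | github.com/eash3010/dbo-simulation | dbo.py | get_ordering
-- ===== SOURCE A (Python) =====
-- def get_ordering(d_time, submission_time, time_range):
-- 	answer = []
-- 	d_time_ind = 0
-- 	for i in range(len(submission_time)):
-- 		while submission_time[i] >= d_time[d_time_ind] and d_time_ind < len(d_time) - 1:
-- 			d_time_ind += 1
-- 		if submission_time[i] < time_range - 2000:
-- 			assert(submission_time[i] >= d_time[d_time_ind-1]), (d_time_ind, submission_time[i], submission_time[i-1], d_time[d_time_ind-2], d_time[d_time_ind-1], d_time[d_time_ind])
-- 			assert(submission_time[i] < d_time[d_time_ind])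
-- 		answer.append((d_time_ind - 1) * time_range + submission_time[i]-d_time[d_time_ind-1])
-- 	return answer
-- ===== SOURCE B (Python) =====
-- def get_ordering(d_time, submission_time, time_range):
--     # Precompute the running-maximum array of d_time once; the first interval
--     # index whose dissemination time exceeds s is then found by binary search
--     # on that (nondecreasing) array, and a running max on the pointer replaces
--     # A's stateful inner scan.
--     pref = []
--     m = None
--     for x in d_time:
--         m = x if m is None or x > m else m
--         pref.append(m)
--     n = len(d_time)
--
--     def first_gt(s):
--         # least index with pref[idx] > s (== n if none); pref is nondecreasing
--         lo, hi = 0, n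
--         while lo < hi:
--             mid = (lo + hi) // 2
--             if s < pref[mid]:
--                 hi = mid
--             else:
--                 lo = mid + 1
--         return lo
--
--     answer = []
--     idx = 0
--     for s in submission_time:
--         j = first_gt(s)
--         if j > n - 1:
--             j = n - 1
--         if j > idx:
--             idx = j
--         answer.append((idx - 1) * time_range + s - d_time[idx - 1])
--     return answer
-- ===== Notes on version B (the rewrite author's own statement) =====
-- stated objective: alternative
-- what changed: A's stateful inner while-scan of d_time is replaced by a precomputed prefix-maximum array queried by binary search per submission, with a running max on the pointer (correct even for unsorted d_time because the first index where the prefix max exceeds s is the first index where d_time exceeds s).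
import Mathlib
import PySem

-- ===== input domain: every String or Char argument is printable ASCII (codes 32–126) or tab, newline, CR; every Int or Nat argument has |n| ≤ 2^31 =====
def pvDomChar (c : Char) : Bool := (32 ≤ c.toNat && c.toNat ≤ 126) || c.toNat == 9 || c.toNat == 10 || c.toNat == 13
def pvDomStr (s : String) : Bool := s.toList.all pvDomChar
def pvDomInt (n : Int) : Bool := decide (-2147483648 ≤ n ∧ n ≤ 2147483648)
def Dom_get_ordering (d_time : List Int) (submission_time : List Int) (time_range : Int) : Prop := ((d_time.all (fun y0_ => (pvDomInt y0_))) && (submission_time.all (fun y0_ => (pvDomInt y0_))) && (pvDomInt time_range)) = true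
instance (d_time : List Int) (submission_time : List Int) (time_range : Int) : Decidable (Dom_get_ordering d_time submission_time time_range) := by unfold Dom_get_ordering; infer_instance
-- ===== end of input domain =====

-- B replaces A's stateful inner while-scan by a precomputed prefix-maximum array queried
-- by binary search plus a running max on the pointer (alternative algorithm, same value).
-- Pre_ excludes exactly the inputs on which A raises (empty d_time / failing assert).

-- ===== PORT A =====
-- inner while loop: advance the pointer while submission_time[i] >= d_time[d_time_ind]
-- and d_time_ind < len(d_time) - 1  (Python's 'idx < len - 1' over ints is 'idx + 1 < len')
def advanceA (d : List Int) (s : Int) (idx : Nat) : Nat :=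
  if s ≥ PySem.List.pyGetD d (idx : Int) 0 ∧ idx + 1 < d.length then
    advanceA d s (idx + 1)
  else idx
termination_by d.length - idx

-- A's for-loop over range(len(submission_time)), i used only as submission_time[i] on the
-- non-raising path: fold over the list with state (answer, d_time_ind).  The
-- 'if s < time_range - 2000: assert …' block either raises (excluded by Pre_get_ordering)
-- or changes nothing, so it contributes nothing to the returned value.
def get_ordering (d_time : List Int) (submission_time : List Int) (time_range : Int) : List Int :=
  (submission_time.foldl
    (fun (st : List Int × Nat) s =>
      let idx := advanceA d_time s st.2
      (st.1 ++ [((idx : Int) - 1) * time_range + s - (PySem.List.pyGet? d_time ((idx : Int) - 1)).getD 0], idx))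
    ([], 0)).1

-- ===== PORT B =====
-- Source B's prefix-maximum array: m = x if m is None or x > m else m, appended per element
def prefMaxGo (m : Int) : List Int → List Int
  | [] => []
  | x :: xs => let m' := if x > m then x else m; m' :: prefMaxGo m' xs

def prefMax : List Int → List Int
  | [] => []
  | x :: xs => x :: prefMaxGo x xs

-- Source B's first_gt: binary search for the least index with s < pref[idx] (n if none)
def bsearchB (pref : List Int) (s : Int) (lo hi : Nat) : Nat :=
  if lo < hi then
    let mid := (lo + hi) / 2
    if s < PySem.List.pyGetD pref (mid : Int) 0 then bsearchB pref s lo mid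
    else bsearchB pref s (mid + 1) hi
  else lo
termination_by hi - lo

-- Source B's main loop: j = first_gt(s) capped at n-1; idx = running max; emit
def get_ordering_alt (d_time : List Int) (submission_time : List Int) (time_range : Int) : List Int :=
  let pref := prefMax d_time
  let n := d_time.length
  (submission_time.foldl
    (fun (st : List Int × Int) s =>
      let j : Int := (bsearchB pref s 0 n : Int)
      let j : Int := if j > (n : Int) - 1 then (n : Int) - 1 else j
      let idx : Int := if j > st.2 then j else st.2
      (st.1 ++ [(idx - 1) * time_range + s - (PySem.List.pyGet? d_time (idx - 1)).getD 0], idx))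
    ([], 0)).1

-- ===== PRECONDITION & SPEC =====
-- closed-form characterisation of A's pointer after submission i (proved below to equal
-- the run of the inner while loop): the running max over the prefix of
-- pvG d s = min(first index k with s < d[k], len(d)-1)
def pvG (d : List Int) (s : Int) : Nat :=
  min (d.findIdx (fun x => s < x)) (d.length - 1)

def pvPtr (d : List Int) (sub : List Int) : Nat :=
  (sub.map (pvG d)).foldl max 0

-- Pre_ excludes exactly the inputs on which A raises: empty d_time with a nonempty
-- submission list (IndexError), and any submission s < time_range - 2000 whose assert
-- block fails (at pointer p the asserts pass iff d[p-1] <= s < d[p], with Python's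
-- negative-index wrap for p = 0).  On every input A returns on, Pre_ holds.
def Pre_get_ordering (d_time : List Int) (submission_time : List Int) (time_range : Int) : Prop :=
  (submission_time = [] ∨ d_time ≠ []) ∧
  ∀ i < submission_time.length,
    submission_time.getD i 0 < time_range - 2000 →
      ((PySem.List.pyGet? d_time ((pvPtr d_time (submission_time.take (i+1)) : Int) - 1)).getD 0
          ≤ submission_time.getD i 0 ∧
       submission_time.getD i 0 <
         (PySem.List.pyGet? d_time (pvPtr d_time (submission_time.take (i+1)) : Int)).getD 0)
instance (d_time : List Int) (submission_time : List Int) (time_range : Int) : Decidable (Pre_get_ordering d_time submission_time time_range) := by unfold Pre_get_ordering; infer_instance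

def pvWitness_get_ordering : List Int × List Int × Int := ([0, 10], [0, 1, 2], 100)

def Spec_get_ordering (d_time : List Int) (submission_time : List Int) (time_range : Int) (out : List Int) : Prop := out = get_ordering_alt d_time submission_time time_range
instance (d_time : List Int) (submission_time : List Int) (time_range : Int) (out : List Int) : Decidable (Spec_get_ordering d_time submission_time time_range out) := by unfold Spec_get_ordering; infer_instance

-- ===== CLAIM (what is proved, stated in full; the proofs are below) =====
def Claim_equal_get_ordering : Prop := ∀ (d_time : List Int) (submission_time : List Int) (time_range : Int), Dom_get_ordering d_time submission_time time_range → Pre_get_ordering d_time submission_time time_range → Spec_get_ordering d_time submission_time time_range (get_ordering d_time submission_time time_range)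

-- ===== LEMMAS AND PROOFS =====

theorem lt_ite_max (s a b : Int) : (s < (if b > a then b else a)) ↔ (s < a ∨ s < b) := by
  split_ifs with h <;> omega

-- the prefix maximum exceeds s at index k iff d's first element > s is at index ≤ k
theorem prefMaxGo_lt_iff (s : Int) (m : Int) (xs : List Int) :
    ∀ k < xs.length,
      (s < (prefMaxGo m xs).getD k 0 ↔ s < m ∨ xs.findIdx (fun x => s < x) ≤ k) := by
  induction xs generalizing m with
  | nil => intro k hk; simp at hk
  | cons x xs ih =>
      intro k hk
      cases k with
      | zero =>
          simp only [prefMaxGo, List.getD_cons_zero, List.findIdx_cons]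
          rw [lt_ite_max]
          by_cases hx : s < x <;> simp [hx]
      | succ k =>
          simp only [prefMaxGo, List.getD_cons_succ]
          rw [ih _ k (by simpa using hk)]
          simp only [List.findIdx_cons]
          rw [lt_ite_max]
          by_cases hx : s < x <;> by_cases hm : s < m <;> simp [hx, hm]

theorem prefMax_lt_iff (s : Int) (d : List Int) :
    ∀ k < d.length,
      (s < (prefMax d).getD k 0 ↔ d.findIdx (fun x => s < x) ≤ k) := by
  cases d with
  | nil => intro k hk; simp at hk
  | cons x xs =>
      intro k hk
      cases k with
      | zero =>
          simp only [prefMax, List.getD_cons_zero, List.findIdx_cons]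
          by_cases hx : s < x <;> simp [hx]
      | succ k =>
          simp only [prefMax, List.getD_cons_succ]
          rw [prefMaxGo_lt_iff s x xs k (by simpa using hk)]
          simp only [List.findIdx_cons]
          by_cases hx : s < x <;> simp [hx]

-- the binary search finds f whenever 's < pref[k] ↔ f ≤ k' and lo ≤ f ≤ hi
theorem bsearchB_inv (pref : List Int) (s : Int) (n : Nat)
    (f : Nat) (hiff : ∀ k < n, (s < pref.getD k 0 ↔ f ≤ k)) :
    ∀ fuel lo hi, hi - lo ≤ fuel → hi ≤ n → lo ≤ f → f ≤ hi →
      bsearchB pref s lo hi = f := by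
  intro fuel
  induction fuel with
  | zero =>
      intro lo hi hfuel hhi hlof hfhi
      rw [bsearchB]
      rw [if_neg (by omega)]
      omega
  | succ fuel ih =>
      intro lo hi hfuel hhi hlof hfhi
      rw [bsearchB]
      by_cases h : lo < hi
      · rw [if_pos h]
        simp only [PySem.List.pyGetD_natCast]
        by_cases hc : s < pref.getD ((lo + hi) / 2) 0
        · rw [if_pos hc]
          have hf : f ≤ (lo + hi) / 2 := (hiff _ (by omega)).mp hc
          exact ih lo ((lo + hi) / 2) (by omega) (by omega) hlof hf
        · rw [if_neg hc]
          have hf : ¬ f ≤ (lo + hi) / 2 := fun hle => hc ((hiff _ (by omega)).mpr hle)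
          exact ih ((lo + hi) / 2 + 1) hi (by omega) hhi (by omega) hfhi
      · rw [if_neg h]; omega

theorem bsearchB_eq (d : List Int) (s : Int) :
    bsearchB (prefMax d) s 0 d.length = d.findIdx (fun x => s < x) := by
  refine bsearchB_inv (prefMax d) s d.length _ ?_ d.length 0 d.length (by omega) le_rfl (by omega) ?_
  · intro k hk
    exact prefMax_lt_iff s d k hk
  · exact List.findIdx_le_length

theorem findIdx_ge (d : List Int) (s : Int) (j : Nat)
    (h : ∀ k < j, d.getD k 0 ≤ s) (hj : j ≤ d.length) :
    j ≤ d.findIdx (fun x => s < x) := by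
  by_contra hlt
  push Not at hlt
  have hfl : d.findIdx (fun x => s < x) < d.length := by
    have := List.findIdx_le_length (p := fun x => decide (s < x)) (xs := d)
    omega
  have hp := List.findIdx_getElem (w := hfl) (p := fun x => decide (s < x)) (xs := d)
  have := h _ hlt
  rw [List.getD_eq_getElem d 0 hfl] at this
  simp at hp
  omega

theorem findIdx_le (d : List Int) (s : Int) (j : Nat)
    (hj : j < d.length) (h : s < d.getD j 0) :
    d.findIdx (fun x => s < x) ≤ j := by
  by_contra hlt
  push Not at hlt
  have hp := List.not_of_lt_findIdx (p := fun x => decide (s < x)) (xs := d) (h := hlt)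
  rw [List.getD_eq_getElem d 0 hj] at h
  simp at hp
  omega

-- the inner while loop, started below every element ≤ s, lands exactly at pvG d s
theorem advanceA_eq (d : List Int) (s : Int) :
    ∀ fuel j, d.length - j ≤ fuel → j + 1 ≤ d.length → (∀ k < j, d.getD k 0 ≤ s) →
      advanceA d s j = pvG d s := by
  intro fuel
  induction fuel with
  | zero => intro j hfuel hj h; omega
  | succ fuel ih =>
      intro j hfuel hj h
      rw [advanceA]
      simp only [PySem.List.pyGetD_natCast]
      by_cases hg : s ≥ d.getD j 0 ∧ j + 1 < d.length
      · rw [if_pos hg]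
        refine ih (j+1) (by omega) (by omega) ?_
        intro k hk
        rcases Nat.lt_succ_iff_lt_or_eq.mp hk with hk | hk
        · exact h k hk
        · subst hk; exact hg.1
      · rw [if_neg hg]
        have hfge : j ≤ d.findIdx (fun x => s < x) := findIdx_ge d s j h (by omega)
        by_cases hend : j + 1 = d.length
        · unfold pvG; omega
        · have hsd : s < d.getD j 0 := by
            rcases not_and_or.mp hg with h1 | h2
            · omega
            · omega
          have hfle := findIdx_le d s j (by omega) hsd
          unfold pvG; omega

-- on the invariant states of A's run, the while loop computes max j (pvG d s)
theorem advanceA_max (d : List Int) (s : Int) (j : Nat)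
    (hj : j + 1 ≤ d.length)
    (hInv : j = 0 ∨ j + 1 = d.length ∨ ∀ k < j, d.getD k 0 < d.getD j 0) :
    advanceA d s j = max j (pvG d s) := by
  by_cases hend : j + 1 = d.length
  · rw [advanceA]
    rw [if_neg (by omega)]
    unfold pvG
    have := List.findIdx_le_length (p := fun x => decide (s < x)) (xs := d)
    omega
  · by_cases hsd : s < d.getD j 0
    · rw [advanceA]
      simp only [PySem.List.pyGetD_natCast]
      rw [if_neg (by omega)]
      have hfle := findIdx_le d s j (by omega) hsd
      unfold pvG
      omega
    · have hall : ∀ k < j, d.getD k 0 ≤ s := by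
        rcases hInv with h0 | h0 | h0
        · omega
        · omega
        · intro k hk; have := h0 k hk; omega
      rw [advanceA_eq d s (d.length - j) j le_rfl hj hall]
      have hfge : j + 1 ≤ d.findIdx (fun x => s < x) := by
        refine findIdx_ge d s (j+1) ?_ (by omega)
        intro k hk
        rcases Nat.lt_succ_iff_lt_or_eq.mp hk with hk | hk
        · exact hall k hk
        · subst hk; omega
      unfold pvG
      omega

theorem advanceA_inv (d : List Int) (s : Int) (j : Nat)
    (hj : j + 1 ≤ d.length)
    (hInv : j = 0 ∨ j + 1 = d.length ∨ ∀ k < j, d.getD k 0 < d.getD j 0) :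
    advanceA d s j + 1 ≤ d.length ∧
      (advanceA d s j = 0 ∨ advanceA d s j + 1 = d.length ∨
        ∀ k < advanceA d s j, d.getD k 0 < d.getD (advanceA d s j) 0) := by
  rw [advanceA_max d s j hj hInv]
  by_cases hle : pvG d s ≤ j
  · rw [max_eq_left hle]
    exact ⟨hj, hInv⟩
  · push Not at hle
    rw [max_eq_right (by omega)]
    have hG : pvG d s ≤ d.length - 1 := by unfold pvG; omega
    refine ⟨by omega, ?_⟩
    by_cases hend : pvG d s + 1 = d.length
    · exact Or.inr (Or.inl hend)
    · have hf : pvG d s = d.findIdx (fun x => s < x) := by unfold pvG at *; omega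
      refine Or.inr (Or.inr ?_)
      intro k hk
      rw [hf] at hk ⊢
      have hfl : d.findIdx (fun x => s < x) < d.length := by unfold pvG at *; omega
      have hp := List.findIdx_getElem (w := hfl) (p := fun x => decide (s < x)) (xs := d)
      have hnp := List.not_of_lt_findIdx (p := fun x => decide (s < x)) (xs := d) (h := hk)
      rw [List.getD_eq_getElem d 0 hfl, List.getD_eq_getElem d 0 (by omega)]
      simp at hp hnp
      omega

theorem fold_eq (d : List Int) (tr : Int) (hd : d ≠ []) :
    ∀ (sub acc : List Int) (j : Nat),
      j + 1 ≤ d.length →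
      (j = 0 ∨ j + 1 = d.length ∨ ∀ k < j, d.getD k 0 < d.getD j 0) →
      (sub.foldl
        (fun (st : List Int × Nat) s =>
          let idx := advanceA d s st.2
          (st.1 ++ [((idx : Int) - 1) * tr + s - (PySem.List.pyGet? d ((idx : Int) - 1)).getD 0], idx))
        (acc, j)).1 =
      (sub.foldl
        (fun (st : List Int × Int) s =>
          let jj : Int := (bsearchB (prefMax d) s 0 d.length : Int)
          let jj : Int := if jj > (d.length : Int) - 1 then (d.length : Int) - 1 else jj
          let idx : Int := if jj > st.2 then jj else st.2
          (st.1 ++ [(idx - 1) * tr + s - (PySem.List.pyGet? d (idx - 1)).getD 0], idx))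
        (acc, (j : Int))).1 := by
  have hn : 1 ≤ d.length := List.length_pos_iff.mpr hd
  intro sub
  induction sub with
  | nil => intro acc j hj hInv; rfl
  | cons s rest ih =>
      intro acc j hj hInv
      simp only [List.foldl_cons]
      have hcap : (if ((bsearchB (prefMax d) s 0 d.length : Nat) : Int) > (d.length : Int) - 1
            then (d.length : Int) - 1
            else ((bsearchB (prefMax d) s 0 d.length : Nat) : Int)) = ((pvG d s : Nat) : Int) := by
        rw [bsearchB_eq d s]
        have hfl := List.findIdx_le_length (p := fun x => decide (s < x)) (xs := d)
        unfold pvG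
        split_ifs with h <;> push_cast at * <;> omega
      have hmax : (if ((pvG d s : Nat) : Int) > (j : Int) then ((pvG d s : Nat) : Int) else (j : Int))
          = ((max j (pvG d s) : Nat) : Int) := by
        split_ifs with h <;> push_cast at * <;> omega
      rw [hcap, hmax, ← advanceA_max d s j hj hInv]
      exact ih _ (advanceA d s j) (advanceA_inv d s j hj hInv).1 (advanceA_inv d s j hj hInv).2

-- ===== VERDICT (by name: the statement is the Claim_ definition above) =====
theorem get_ordering_spec : Claim_equal_get_ordering := by
  intro d sub tr _ hpre
  unfold Spec_get_ordering get_ordering get_ordering_alt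
  rcases hpre.1 with h | h
  · subst h; rfl
  · exact fold_eq d tr h sub [] 0 (by have := List.length_pos_iff.mpr h; omega) (Or.inl rfl)
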